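-- pv_equiv track=rewrite | github.com/ShivenA99/IntegrityShield | backend/app/services/pipeline/enhancement_methods/base_renderer.py | _compute_occurrence_index
-- ===== SOURCE A (Python) =====
-- from typing import Dict, Iterable, List, Tuple, Optional
--
-- def _compute_occurrence_index(stem_text: str, original: str, target_index: int) -> int:
--     if not original:
--         return 0
--     occurrences: List[int] = []
--     search_from = 0
--     while True:
--         idx = stem_text.find(original, search_from)
--         if idx == -1:
--             break
--         occurrences.append(idx)
--         search_from = idx + 1
--     if not occurrences:
--         return 0
--     if target_index in occurrences:
--         return occurrences.index(target_index)
--     closest = min(occurrences, key=lambda val: abs(val - target_index))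
--     return occurrences.index(closest)
-- ===== SOURCE B (Python) =====
-- def _compute_occurrence_index(stem_text: str, original: str, target_index: int) -> int:
--     # One fused pass over the find-loop: track rank and best (rank, distance);
--     # exact match returns immediately; strict '<' keeps the earliest tie.
--     if not original:
--         return 0
--     rank = 0
--     best = None
--     search_from = 0
--     while True:
--         idx = stem_text.find(original, search_from)
--         if idx == -1:
--             break
--         if idx == target_index:
--             return rank
--         dist = abs(idx - target_index)
--         if best is None or dist < best[1]:
--             best = (rank, dist)
--         rank += 1
--         search_from = idx + 1
--     return 0 if best is None else best[0]
-- ===== Notes on version B (the rewrite author's own statement) =====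
-- stated objective: alternative
-- what changed: B fuses A's four phases (build the full occurrence list, membership test, min-by-distance scan, .index scan) into a single pass over the find-loop that returns the rank immediately on an exact match and otherwise tracks the best (rank, distance) pair with strict-less-than so the earliest occurrence wins ties; the occurrence list is never materialised.
import Mathlib
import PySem

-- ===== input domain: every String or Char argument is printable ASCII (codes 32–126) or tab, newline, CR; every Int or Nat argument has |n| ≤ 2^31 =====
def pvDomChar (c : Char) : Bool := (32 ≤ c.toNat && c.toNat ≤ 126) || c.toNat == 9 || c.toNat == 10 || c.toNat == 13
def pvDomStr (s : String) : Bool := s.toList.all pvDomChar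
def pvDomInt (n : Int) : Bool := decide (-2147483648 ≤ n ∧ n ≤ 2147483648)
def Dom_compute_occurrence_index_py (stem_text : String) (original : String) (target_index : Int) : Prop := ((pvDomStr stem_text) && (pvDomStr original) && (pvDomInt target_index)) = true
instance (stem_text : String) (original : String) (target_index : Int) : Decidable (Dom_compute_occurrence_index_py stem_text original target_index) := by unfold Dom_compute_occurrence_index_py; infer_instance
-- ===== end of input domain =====

-- B fuses A's list-building and its three subsequent scans into one pass over the same
-- find-loop (alternative decomposition, same asymptotic cost).

-- ===== PORT A =====
-- the `while True: idx = stem_text.find(original, search_from)` collection loop;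
-- fuel (length+1) strictly bounds the number of iterations, the loop never exhausts it
def pvCollectA (stem orig : String) (fuel : Nat) (searchFrom : Int) : List Int :=
  match fuel with
  | 0 => []
  | fuel + 1 =>
    let idx := PySem.Str.findFrom stem orig searchFrom
    if idx = -1 then []
    else idx :: pvCollectA stem orig fuel (idx + 1)

def compute_occurrence_index_py (stem_text : String) (original : String) (target_index : Int) : Int :=
  if original = "" then 0
  else
    let occurrences := pvCollectA stem_text original (stem_text.length + 1) 0
    if occurrences = [] then 0
    else if target_index ∈ occurrences then
      -- .index never raises here: membership was just checked
      ((PySem.List.index? occurrences target_index).getD 0 : Nat)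
    else
      -- min never raises here: occurrences is nonempty
      let closest := (PySem.List.min? occurrences (fun val => |val - target_index|)).getD 0
      ((PySem.List.index? occurrences closest).getD 0 : Nat)

-- ===== PORT B =====
-- `return 0 if best is None else best[0]`
def pvFinishB (best : Option (Nat × Int)) : Int :=
  match best with
  | none => 0
  | some (r, _) => (r : Int)

-- B's single while-loop: rank counter plus best (rank, distance) tracker
def pvLoopB (stem orig : String) (t : Int) (fuel : Nat) (searchFrom : Int)
    (rank : Nat) (best : Option (Nat × Int)) : Int :=
  match fuel with
  | 0 => pvFinishB best
  | fuel + 1 =>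
    let idx := PySem.Str.findFrom stem orig searchFrom
    if idx = -1 then pvFinishB best
    else if idx = t then (rank : Int)
    else
      let dist := |idx - t|
      let best' :=
        match best with
        | none => some (rank, dist)
        | some (r, d) => if dist < d then some (rank, dist) else some (r, d)
      pvLoopB stem orig t fuel (idx + 1) (rank + 1) best'

def compute_occurrence_index_py_alt (stem_text : String) (original : String) (target_index : Int) : Int :=
  if original = "" then 0
  else pvLoopB stem_text original target_index (stem_text.length + 1) 0 0 none

-- ===== PRECONDITION & SPEC =====
def Spec_compute_occurrence_index_py (stem_text : String) (original : String) (target_index : Int) (out : Int) : Prop := out = compute_occurrence_index_py_alt stem_text original target_index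
instance (stem_text : String) (original : String) (target_index : Int) (out : Int) : Decidable (Spec_compute_occurrence_index_py stem_text original target_index out) := by unfold Spec_compute_occurrence_index_py; infer_instance

-- ===== CLAIM (what is proved, stated in full; the proofs are below) =====
def Claim_equal_compute_occurrence_index_py : Prop := ∀ (stem_text : String) (original : String) (target_index : Int), Dom_compute_occurrence_index_py stem_text original target_index → Spec_compute_occurrence_index_py stem_text original target_index (compute_occurrence_index_py stem_text original target_index)

-- ===== LEMMAS AND PROOFS =====

-- the best-tracker update of one loop iteration
def pvUpd (t : Int) (best : Option (Nat × Int)) (rank : Nat) (x : Int) : Option (Nat × Int) :=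
  match best with
  | none => some (rank, |x - t|)
  | some (r, d) => if |x - t| < d then some (rank, |x - t|) else some (r, d)

-- B's loop as a function of the occurrence LIST
def pvAnswer (t : Int) : List Int → Nat → Option (Nat × Int) → Int
  | [], _, best => pvFinishB best
  | x :: xs, rank, best =>
    if x = t then (rank : Int) else pvAnswer t xs (rank + 1) (pvUpd t best rank x)

-- best-tracker fold over a list
def pvBfold (t : Int) (best : Option (Nat × Int)) (rank : Nat) : List Int → Option (Nat × Int)
  | [] => best
  | x :: xs => pvBfold t (pvUpd t best rank x) (rank + 1) xs

-- canonical tracker state after scanning l from rank 0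
def pvBOf (t : Int) (l : List Int) : Option (Nat × Int) :=
  (PySem.List.min? l (fun v => |v - t|)).map
    (fun v => ((PySem.List.index? l v).getD 0, |v - t|))

lemma pvLoopB_eq_answer (stem orig : String) (t : Int) :
    ∀ (fuel : Nat) (sf : Int) (rank : Nat) (best : Option (Nat × Int)),
      pvLoopB stem orig t fuel sf rank best =
        pvAnswer t (pvCollectA stem orig fuel sf) rank best := by
  intro fuel
  induction fuel with
  | zero => intro sf rank best; simp [pvLoopB, pvCollectA, pvAnswer]
  | succ n ih =>
    intro sf rank best
    simp only [pvLoopB, pvCollectA]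
    split_ifs with h1 h2
    · simp [pvAnswer]
    · simp only [pvAnswer]; rw [if_pos h2]
    · simp only [pvAnswer]; rw [if_neg h2, ih]; rfl

lemma pvAnswer_mem (t : Int) :
    ∀ (l : List Int) (rank : Nat) (best : Option (Nat × Int)), t ∈ l →
      pvAnswer t l rank best = (rank : Int) + ((PySem.List.index? l t).getD 0 : Nat) := by
  intro l
  induction l with
  | nil => intro rank best h; cases h
  | cons x xs ih =>
    intro rank best h
    by_cases hx : x = t
    · subst hx
      simp only [pvAnswer]
      rw [if_true, PySem.List.index?_cons_self]
      simp
    · have ht : t ∈ xs := by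
        rcases List.mem_cons.mp h with h' | h'
        · exact absurd h'.symm hx
        · exact h'
      obtain ⟨k, hk⟩ := Option.isSome_iff_exists.mp ((PySem.List.index?_isSome_iff xs t).mpr ht)
      simp only [pvAnswer]
      rw [if_neg hx, ih _ _ ht, PySem.List.index?_cons_of_ne xs hx, hk]
      simp
      ring

lemma pvAnswer_not_mem (t : Int) :
    ∀ (l : List Int) (rank : Nat) (best : Option (Nat × Int)), t ∉ l →
      pvAnswer t l rank best = pvFinishB (pvBfold t best rank l) := by
  intro l
  induction l with
  | nil => intro rank best _; rfl
  | cons x xs ih =>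
    intro rank best h
    simp only [pvAnswer, pvBfold]
    have hx : ¬ x = t := fun hx => h (hx ▸ List.mem_cons_self ..)
    rw [if_neg hx, ih _ _ (fun hm => h (List.mem_cons_of_mem _ hm))]

lemma pvUpd_bOf (t : Int) (pre : List Int) (x : Int) (h : (pre ++ [x]).Nodup) :
    pvUpd t (pvBOf t pre) pre.length x = pvBOf t (pre ++ [x]) := by
  cases hp : PySem.List.min? pre (fun v => |v - t|) with
  | none =>
    have hpre : pre = [] := (PySem.List.min?_eq_none_iff pre _).mp hp
    subst hpre
    simp [pvBOf, pvUpd, PySem.List.min?]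
  | some m =>
    have hm : m ∈ pre := PySem.List.min?_mem hp
    have hxpre : x ∉ pre := by
      have hd := List.disjoint_of_nodup_append h
      exact fun hx => hd hx (List.mem_singleton.mpr rfl)
    have hmin : PySem.List.min? (pre ++ [x]) (fun v => |v - t|) =
        (match PySem.List.min? pre (fun v => |v - t|) with
         | none => some x
         | some m => if |x - t| < |m - t| then some x else some m) := by
      unfold PySem.List.min?
      rw [List.foldl_append]
      generalize List.foldl _ none pre = acc
      cases acc with
      | none => rfl
      | some q => rfl
    simp only [pvBOf, hp, hmin, Option.map_some, pvUpd]
    by_cases hlt : |x - t| < |m - t|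
    · rw [if_pos hlt, if_pos hlt, Option.map_some,
        PySem.List.index?_append_singleton_self pre x hxpre]
      simp
    · rw [if_neg hlt, if_neg hlt, Option.map_some,
        PySem.List.index?_append_of_mem [x] hm]

lemma pvBfold_bOf (t : Int) :
    ∀ (l pre : List Int), (pre ++ l).Nodup →
      pvBfold t (pvBOf t pre) pre.length l = pvBOf t (pre ++ l) := by
  intro l
  induction l with
  | nil => intro pre _; simp [pvBfold]
  | cons x xs ih =>
    intro pre h
    have hassoc : pre ++ x :: xs = (pre ++ [x]) ++ xs := by simp
    rw [hassoc] at h ⊢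
    have h1 : (pre ++ [x]).Nodup := h.sublist (List.sublist_append_left _ _)
    simp only [pvBfold]
    rw [pvUpd_bOf t pre x h1]
    have := ih (pre ++ [x]) h
    simpa using this

lemma pvFindFacts (stem orig : String) (ho : orig.toList ≠ []) (sf : Int) (h0 : 0 ≤ sf)
    (hle : sf.toNat ≤ stem.toList.length)
    (hne : PySem.Str.findFrom stem orig sf ≠ -1) :
    sf ≤ PySem.Str.findFrom stem orig sf ∧
      (PySem.Str.findFrom stem orig sf).toNat < stem.toList.length := by
  have hsf : ((sf.toNat : Nat) : Int) = sf := Int.toNat_of_nonneg h0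
  rw [PySem.Str.findFrom_eq] at hne ⊢
  rw [← hsf] at hne ⊢
  obtain ⟨h1, h2, -⟩ := PySem.Chars.findFrom_natCast_spec stem.toList orig.toList sf.toNat hle hne
  refine ⟨h1, ?_⟩
  have hlen := h2.length_le
  rw [List.length_drop] at hlen
  have hpos : 1 ≤ orig.toList.length := List.length_pos_of_ne_nil ho
  omega

lemma pvCollectA_lb (stem orig : String) (ho : orig.toList ≠ []) :
    ∀ (fuel : Nat) (sf : Int), 0 ≤ sf → sf.toNat ≤ stem.toList.length →
      ∀ x ∈ pvCollectA stem orig fuel sf, sf ≤ x := by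
  intro fuel
  induction fuel with
  | zero => intro sf _ _ x hx; simp [pvCollectA] at hx
  | succ n ih =>
    intro sf h0 hle x hx
    simp only [pvCollectA] at hx
    by_cases hidx : PySem.Str.findFrom stem orig sf = -1
    · rw [if_pos hidx] at hx; simp at hx
    · rw [if_neg hidx] at hx
      obtain ⟨hge, hlt⟩ := pvFindFacts stem orig ho sf h0 hle hidx
      rcases List.mem_cons.mp hx with h' | h'
      · omega
      · have h0' : 0 ≤ PySem.Str.findFrom stem orig sf + 1 := by omega
        have hle' : (PySem.Str.findFrom stem orig sf + 1).toNat ≤ stem.toList.length := by omega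
        have := ih _ h0' hle' x h'
        omega

lemma pvCollectA_chain (stem orig : String) (ho : orig.toList ≠ []) :
    ∀ (fuel : Nat) (sf : Int), 0 ≤ sf → sf.toNat ≤ stem.toList.length →
      (pvCollectA stem orig fuel sf).Pairwise (· < ·) := by
  intro fuel
  induction fuel with
  | zero => intro sf _ _; simp [pvCollectA]
  | succ n ih =>
    intro sf h0 hle
    simp only [pvCollectA]
    by_cases hidx : PySem.Str.findFrom stem orig sf = -1
    · rw [if_pos hidx]; simp
    · rw [if_neg hidx]
      obtain ⟨hge, hlt⟩ := pvFindFacts stem orig ho sf h0 hle hidx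
      have h0' : 0 ≤ PySem.Str.findFrom stem orig sf + 1 := by omega
      have hle' : (PySem.Str.findFrom stem orig sf + 1).toNat ≤ stem.toList.length := by omega
      refine List.Pairwise.cons ?_ (ih _ h0' hle')
      intro y hy
      have := pvCollectA_lb stem orig ho n _ h0' hle' y hy
      omega

-- ===== VERDICT (by name: the statement is the Claim_ definition above) =====
theorem compute_occurrence_index_py_spec : Claim_equal_compute_occurrence_index_py := by
  intro stem orig t _
  unfold Spec_compute_occurrence_index_py
  unfold compute_occurrence_index_py compute_occurrence_index_py_alt
  by_cases ho : orig = ""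
  · rw [if_pos ho, if_pos ho]
  · rw [if_neg ho, if_neg ho]
    have ho' : orig.toList ≠ [] := fun hn => ho (String.toList_eq_nil_iff.mp hn)
    set occ := pvCollectA stem orig (stem.length + 1) 0 with hocc
    have hchain : occ.Pairwise (· < ·) :=
      pvCollectA_chain stem orig ho' (stem.length + 1) 0 le_rfl (by simp)
    have hnd : occ.Nodup := hchain.imp (fun h => ne_of_lt h)
    rw [pvLoopB_eq_answer stem orig t (stem.length + 1) 0 0 none, ← hocc]
    by_cases hemp : occ = []
    · rw [if_pos hemp, hemp]
      rfl
    · rw [if_neg hemp]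
      by_cases hmem : t ∈ occ
      · rw [if_pos hmem, pvAnswer_mem t occ 0 none hmem]
        simp
      · rw [if_neg hmem, pvAnswer_not_mem t occ 0 none hmem]
        have hb : pvBfold t none 0 occ = pvBOf t occ := by
          have h0 : pvBOf t ([] : List Int) = none := by simp [pvBOf, PySem.List.min?]
          have := pvBfold_bOf t occ [] (by simpa using hnd)
          simpa [h0] using this
        rw [hb]
        cases hmq : PySem.List.min? occ (fun v => |v - t|) with
        | none => exact absurd ((PySem.List.min?_eq_none_iff occ _).mp hmq) hemp
        | some m =>
          simp [pvBOf, hmq, pvFinishB]
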